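-- pv_equiv track=rewrite | github.com/googlove/Python-OOP | Tetris-v1.0/ai.py | trackHeight
-- ===== SOURCE A (Python) =====
-- def trackHeight(stone, stone_x, board, array):
--     #print "trackHeight array is immediately ", array
--     #print "------------------"
--     #for r in board:
--      #   print r, '\n'
--     #print "------------------"
--     span = len(stone[0])
--     for n in range (stone_x, stone_x+span):
--         i = -1
--         for x in board:
--             i += 1
--             if x[n]:
--                 array[n] = 22-i
--                 break
--     #print array
--     return array
-- ===== SOURCE B (Python) =====
-- def trackHeight(stone, stone_x, board, array):
--     # Single top-down row sweep: resolve all stone columns in one pass over the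
--     # board, recording each column's height in a dict, then apply the writes
--     # to array in column order.  (Mutates array in place, like the original.)
--     cols = list(range(stone_x, stone_x + len(stone[0])))
--     pending = cols
--     heights = {}
--     i = 0
--     for row in board:
--         if not pending:
--             break
--         remaining = []
--         for n in pending:
--             if row[n]:
--                 heights[n] = 22 - i
--             else:
--                 remaining.append(n)
--         pending = remaining
--         i += 1
--     for n in cols:
--         if n in heights:
--             array[n] = heights[n]
--     return array
-- ===== Notes on version B (the rewrite author's own statement) =====
-- stated objective: alternative
-- what changed: Column-major rescans of the board (inner scan per stone column with a break) are replaced by one top-down row sweep that resolves all pending columns at once into a dict of heights, applied to array afterwards.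
import Mathlib
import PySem

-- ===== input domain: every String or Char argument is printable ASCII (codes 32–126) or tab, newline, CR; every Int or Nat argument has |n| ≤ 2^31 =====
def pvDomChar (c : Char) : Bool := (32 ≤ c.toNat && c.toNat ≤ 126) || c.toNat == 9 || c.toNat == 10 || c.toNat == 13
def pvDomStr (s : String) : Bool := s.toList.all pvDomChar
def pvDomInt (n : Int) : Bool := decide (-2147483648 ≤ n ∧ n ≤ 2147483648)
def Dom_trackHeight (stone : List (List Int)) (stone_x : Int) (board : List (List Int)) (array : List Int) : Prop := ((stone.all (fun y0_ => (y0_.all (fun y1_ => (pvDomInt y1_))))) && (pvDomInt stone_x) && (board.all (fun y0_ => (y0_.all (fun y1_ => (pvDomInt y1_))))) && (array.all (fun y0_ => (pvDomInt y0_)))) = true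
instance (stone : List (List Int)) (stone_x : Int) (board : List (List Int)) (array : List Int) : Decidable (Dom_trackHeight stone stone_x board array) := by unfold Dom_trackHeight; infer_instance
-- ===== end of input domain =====

-- B replaces A's column-major rescans by one top-down row sweep into a dict of heights,
-- applied to array in column order afterwards (equivalence is about the return value;
-- both Pythons mutate `array` in place identically).


-- ===== PORT A =====
-- inner 'for x in board: i += 1; if x[n]: … break' loop; pyGetD is exact under Pre_ (index in range on every accessed cell)
def aFindCol (board : List (List Int)) (n : Int) (i : Int) : Option Int :=
  match board with
  | [] => none
  | x :: rest =>
    let i := i + 1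
    if PySem.List.pyGetD x n 0 ≠ 0 then some (22 - i) else aFindCol rest n i

def trackHeight (stone : List (List Int)) (stone_x : Int) (board : List (List Int)) (array : List Int) : List Int :=
  let span : Int := ((PySem.List.pyGetD stone 0 []).length : Int)
  (PySem.List.pyRange stone_x (stone_x + span) 1).foldl
    (fun arr n =>
      match aFindCol board n (-1) with
      | some v => PySem.List.pySetD arr n v   -- array[n] = 22-i; exact under Pre_
      | none => arr) array

-- ===== PORT B =====
-- inner 'for n in pending: …' loop of Source B: returns (heights, remaining)
def bMark (row : List Int) (i : Int) (pending : List Int) (heights : PySem.Dict Int Int) :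
    PySem.Dict Int Int × List Int :=
  pending.foldl
    (fun (st : PySem.Dict Int Int × List Int) n =>
      if PySem.List.pyGetD row n 0 ≠ 0 then (st.1.insert n (22 - i), st.2)
      else (st.1, st.2 ++ [n]))
    (heights, [])

-- the 'for row in board' sweep with early break when pending is empty
def bSweep (board : List (List Int)) (i : Int) (pending : List Int) (heights : PySem.Dict Int Int) :
    PySem.Dict Int Int :=
  match board with
  | [] => heights
  | row :: rest =>
    if pending = [] then heights
    else
      let st := bMark row i pending heights
      bSweep rest (i + 1) st.2 st.1

def trackHeight_alt (stone : List (List Int)) (stone_x : Int) (board : List (List Int)) (array : List Int) : List Int :=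
  let cols := PySem.List.pyRange stone_x (stone_x + ((PySem.List.pyGetD stone 0 []).length : Int)) 1
  let heights := bSweep board 0 cols PySem.Dict.empty
  cols.foldl
    (fun arr n =>
      match heights.get? n with
      | some v => PySem.List.pySetD arr n v
      | none => arr) array

-- ===== PRECONDITION & SPEC =====
-- Pre_ excludes exactly the inputs on which the Python A raises IndexError: an empty stone
-- (stone[0]), a cell x[n] out of range for a row the per-column scan actually reaches before
-- its break, or array[n] out of range when a truthy cell causes the write.  (B raises on the
-- same inputs: it performs the same cell accesses and writes, in row-major order.)
def Pre_trackHeight (stone : List (List Int)) (stone_x : Int) (board : List (List Int)) (array : List Int) : Prop :=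
  stone ≠ [] ∧
  ∀ n ∈ PySem.List.pyRange stone_x (stone_x + ((PySem.List.pyGetD stone 0 []).length : Int)) 1,
    (∀ j < board.length,
       (∀ k < j, PySem.Raise.InRange (board.getD k []).length n ∧
                 PySem.List.pyGetD (board.getD k []) n 0 = 0) →
       PySem.Raise.InRange (board.getD j []).length n) ∧
    ((∃ x ∈ board, PySem.List.pyGetD x n 0 ≠ 0) → PySem.Raise.InRange array.length n)
instance (stone : List (List Int)) (stone_x : Int) (board : List (List Int)) (array : List Int) : Decidable (Pre_trackHeight stone stone_x board array) := by unfold Pre_trackHeight; infer_instance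

def pvWitness_trackHeight : List (List Int) × Int × List (List Int) × List Int :=
  ([[1, 1]], 0, [[0, 0], [1, 0]], [0, 0])

def Spec_trackHeight (stone : List (List Int)) (stone_x : Int) (board : List (List Int)) (array : List Int) (out : List Int) : Prop := out = trackHeight_alt stone stone_x board array
instance (stone : List (List Int)) (stone_x : Int) (board : List (List Int)) (array : List Int) (out : List Int) : Decidable (Spec_trackHeight stone stone_x board array out) := by unfold Spec_trackHeight; infer_instance

-- ===== CLAIM (what is proved, stated in full; the proofs are below) =====
def Claim_equal_trackHeight : Prop := ∀ (stone : List (List Int)) (stone_x : Int) (board : List (List Int)) (array : List Int), Dom_trackHeight stone stone_x board array → Pre_trackHeight stone stone_x board array → Spec_trackHeight stone stone_x board array (trackHeight stone stone_x board array)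

-- ===== LEMMAS AND PROOFS =====

-- A's inner scan with the index pre-incremented (value reported for row k is 22 - (i + k))
def aFind' (board : List (List Int)) (n : Int) (i : Int) : Option Int :=
  match board with
  | [] => none
  | x :: rest =>
    if PySem.List.pyGetD x n 0 ≠ 0 then some (22 - i) else aFind' rest n (i + 1)

theorem aFindCol_eq_aFind' (board : List (List Int)) (n : Int) :
    ∀ i : Int, aFindCol board n i = aFind' board n (i + 1) := by
  induction board with
  | nil => intro i; rfl
  | cons x rest ih =>
    intro i
    simp only [aFindCol, aFind']
    split_ifs with h
    · rfl
    · exact ih (i + 1)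

theorem bMark_snd (row : List Int) (i : Int) :
    ∀ (pending : List Int) (h : PySem.Dict Int Int) (rem : List Int),
      (pending.foldl
        (fun (st : PySem.Dict Int Int × List Int) n =>
          if PySem.List.pyGetD row n 0 ≠ 0 then (st.1.insert n (22 - i), st.2)
          else (st.1, st.2 ++ [n])) (h, rem)).2
      = rem ++ pending.filter (fun n => PySem.List.pyGetD row n 0 == 0) := by
  intro pending
  induction pending with
  | nil => intro h rem; simp
  | cons n rest ih =>
    intro h rem
    simp only [List.foldl_cons, List.filter_cons]
    by_cases hn : PySem.List.pyGetD row n 0 ≠ 0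
    · rw [if_pos hn]
      have : (PySem.List.pyGetD row n 0 == 0) = false := by
        simpa using hn
      rw [this]
      exact ih _ _
    · rw [if_neg hn]
      have : (PySem.List.pyGetD row n 0 == 0) = true := by
        simpa using (not_not.mp hn)
      rw [this]
      rw [ih _ _]
      simp

theorem bMark_fst_get? (row : List Int) (i : Int) :
    ∀ (pending : List Int) (h : PySem.Dict Int Int) (rem : List Int) (m : Int),
      ((pending.foldl
        (fun (st : PySem.Dict Int Int × List Int) n =>
          if PySem.List.pyGetD row n 0 ≠ 0 then (st.1.insert n (22 - i), st.2)
          else (st.1, st.2 ++ [n])) (h, rem)).1).get? m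
      = if m ∈ pending ∧ PySem.List.pyGetD row m 0 ≠ 0 then some (22 - i) else h.get? m := by
  intro pending
  induction pending with
  | nil => intro h rem m; simp
  | cons n rest ih =>
    intro h rem m
    simp only [List.foldl_cons]
    by_cases hn : PySem.List.pyGetD row n 0 ≠ 0
    · rw [if_pos hn, ih]
      by_cases hm : m ∈ rest ∧ PySem.List.pyGetD row m 0 ≠ 0
      · rw [if_pos hm, if_pos ⟨List.mem_cons_of_mem _ hm.1, hm.2⟩]
      · rw [if_neg hm]
        by_cases hmn : m = n
        · subst hmn
          rw [PySem.Dict.get?_insert_self]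
          rw [if_pos ⟨List.mem_cons_self, hn⟩]
        · rw [PySem.Dict.get?_insert_of_ne _ _ hmn]
          have : ¬ (m ∈ n :: rest ∧ PySem.List.pyGetD row m 0 ≠ 0) := by
            intro ⟨h1, h2⟩
            rcases List.mem_cons.mp h1 with h1 | h1
            · exact hmn h1
            · exact hm ⟨h1, h2⟩
          rw [if_neg this]
    · rw [if_neg hn, ih]
      by_cases hm : m ∈ rest ∧ PySem.List.pyGetD row m 0 ≠ 0
      · rw [if_pos hm, if_pos ⟨List.mem_cons_of_mem _ hm.1, hm.2⟩]
      · rw [if_neg hm]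
        have : ¬ (m ∈ n :: rest ∧ PySem.List.pyGetD row m 0 ≠ 0) := by
          intro ⟨h1, h2⟩
          rcases List.mem_cons.mp h1 with h1 | h1
          · subst h1; exact hn h2
          · exact hm ⟨h1, h2⟩
        rw [if_neg this]

theorem bSweep_get? (board : List (List Int)) (n : Int) :
    ∀ (i : Int) (pending : List Int) (h : PySem.Dict Int Int),
      (bSweep board i pending h).get? n
        = if n ∈ pending then (aFind' board n i).or (h.get? n) else h.get? n := by
  induction board with
  | nil =>
    intro i pending h
    simp only [bSweep, aFind', Option.none_or]
    split_ifs <;> rfl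
  | cons row rest ih =>
    intro i pending h
    simp only [bSweep]
    by_cases hp : pending = []
    · subst hp; simp
    · rw [if_neg hp]
      show (bSweep rest (i + 1) (bMark row i pending h).2 (bMark row i pending h).1).get? n = _
      rw [ih]
      have hsnd := bMark_snd row i pending h []
      have hfst := bMark_fst_get? row i pending h [] n
      simp only [bMark] at *
      rw [hsnd, hfst]
      simp only [List.nil_append, List.mem_filter]
      by_cases hmem : n ∈ pending
      · by_cases htr : PySem.List.pyGetD row n 0 ≠ 0
        · have h1 : ¬ (n ∈ pending ∧ (PySem.List.pyGetD row n 0 == 0) = true) := by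
            intro ⟨_, h2⟩; exact htr (by simpa using h2)
          rw [if_neg h1, if_pos ⟨hmem, htr⟩, if_pos hmem]
          show _ = (aFind' (row :: rest) n i).or (h.get? n)
          simp only [aFind']
          rw [if_pos htr]
          rfl
        · have h1 : (n ∈ pending ∧ (PySem.List.pyGetD row n 0 == 0) = true) := by
            refine ⟨hmem, ?_⟩
            simpa using (not_not.mp htr)
          rw [if_pos h1, if_neg (by exact fun hc => htr hc.2), if_pos hmem]
          show _ = (aFind' (row :: rest) n i).or (h.get? n)
          simp only [aFind']
          rw [if_neg htr]
      · have h1 : ¬ (n ∈ pending ∧ (PySem.List.pyGetD row n 0 == 0) = true) :=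
          fun hc => hmem hc.1
        rw [if_neg h1, if_neg (fun hc : _ ∧ _ => hmem hc.1), if_neg hmem]

-- ===== VERDICT (by name: the statement is the Claim_ definition above) =====
theorem trackHeight_spec : Claim_equal_trackHeight := by
  intro stone stone_x board array _hdom _hpre
  unfold Spec_trackHeight trackHeight trackHeight_alt
  apply PySem.List.foldl_congr_mem
  intro acc n hn
  have hget := bSweep_get? board n 0
      (PySem.List.pyRange stone_x (stone_x + ((PySem.List.pyGetD stone 0 []).length : Int)) 1)
      PySem.Dict.empty
  rw [hget, if_pos hn]
  rw [PySem.Dict.get?_empty, Option.or_none]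
  rw [aFindCol_eq_aFind']
  norm_num
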